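-- pv_equiv track=rewrite | github.com/DegreeDoctor/site | backend/scrapers/program_scraper.py | parse_template
-- ===== SOURCE A (Python) =====
-- from collections import OrderedDict
--
-- def parse_template(semesters,extra):
--     sems = OrderedDict()
--     curr_year = 1
--     first_sem_in_year = True
--     for item in semesters:
--         template_str = str(curr_year) + "-"
--         # Extra content
--         if curr_year > 4:
--             extra.extend(item)
--             continue
--         # Year 1,2 and 4
--         if curr_year != 3:
--             if first_sem_in_year:
--                 template_str += "Fall"
--             elif not first_sem_in_year:
--                 template_str += "Spring"
--                 curr_year += 1
--             first_sem_in_year = not first_sem_in_year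
--         else:
--             if first_sem_in_year:
--                 template_str += "Summer"
--             elif not first_sem_in_year:
--                 template_str += "Fall or Spring"
--                 curr_year += 1
--             first_sem_in_year = not first_sem_in_year
--         sems[template_str] = item
--     return sems
-- ===== SOURCE B (Python) =====
-- from collections import OrderedDict
--
-- LABELS = ["1-Fall", "1-Spring", "2-Fall", "2-Spring",
--           "3-Summer", "3-Fall or Spring", "4-Fall", "4-Spring"]
--
-- def parse_template(semesters, extra):
--     sems = OrderedDict(zip(LABELS, semesters))
--     for item in semesters[len(LABELS):]:
--         extra.extend(item)
--     return sems
-- ===== Notes on version B (the rewrite author's own statement) =====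
-- stated objective: simpler
-- what changed: Replaced the curr_year/first_sem_in_year state machine that builds each label with string arithmetic by a fixed 8-entry label table zipped with the semesters (extra items past the table are extended into extra exactly as before).
import Mathlib
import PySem

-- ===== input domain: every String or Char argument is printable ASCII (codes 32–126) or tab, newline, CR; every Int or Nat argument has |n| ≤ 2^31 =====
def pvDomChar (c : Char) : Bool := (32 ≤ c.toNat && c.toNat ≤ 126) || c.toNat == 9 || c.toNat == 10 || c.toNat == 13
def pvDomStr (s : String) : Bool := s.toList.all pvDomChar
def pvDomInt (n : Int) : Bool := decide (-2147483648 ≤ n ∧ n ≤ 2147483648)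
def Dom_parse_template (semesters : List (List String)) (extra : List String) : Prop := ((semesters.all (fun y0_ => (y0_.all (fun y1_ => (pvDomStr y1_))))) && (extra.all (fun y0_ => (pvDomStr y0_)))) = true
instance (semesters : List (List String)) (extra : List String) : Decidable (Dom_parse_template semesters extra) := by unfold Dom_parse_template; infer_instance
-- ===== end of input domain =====

-- B replaces A's curr_year/first_sem_in_year state machine by a fixed label table zipped with
-- the semesters (objective: simpler). Both programs extend `extra` in place with the items past
-- the 8th semester identically; the theorem below is about the returned dict (as its item list).

-- ===== PORT A =====
-- the for-loop of A: state = (sems, curr_year, first_sem_in_year); extra is only mutated, never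
-- read into the return value, so the port carries the dict state only
def pvLoopA : List (List String) → PySem.Dict String (List String) → Int → Bool →
    PySem.Dict String (List String)
  | [], sems, _, _ => sems
  | item :: rest, sems, cy, fs =>
    if cy > 4 then
      -- extra.extend(item); continue
      pvLoopA rest sems cy fs
    else if cy ≠ 3 then
      if fs then pvLoopA rest (sems.insert (PySem.Int.toStr cy ++ "-Fall") item) cy (!fs)
      else pvLoopA rest (sems.insert (PySem.Int.toStr cy ++ "-Spring") item) (cy + 1) (!fs)
    else
      if fs then pvLoopA rest (sems.insert (PySem.Int.toStr cy ++ "-Summer") item) cy (!fs)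
      else pvLoopA rest (sems.insert (PySem.Int.toStr cy ++ "-Fall or Spring") item) (cy + 1) (!fs)

def parse_template (semesters : List (List String)) (extra : List String) :
    List (String × List String) :=
  (pvLoopA semesters PySem.Dict.empty 1 true).items

-- ===== PORT B =====
def pvLabels : List String :=
  ["1-Fall", "1-Spring", "2-Fall", "2-Spring", "3-Summer", "3-Fall or Spring", "4-Fall", "4-Spring"]

def parse_template_alt (semesters : List (List String)) (extra : List String) :
    List (String × List String) :=
  (PySem.Dict.ofList (pvLabels.zip semesters)).items

-- ===== PRECONDITION & SPEC =====
def Spec_parse_template (semesters : List (List String)) (extra : List String) (out : List (String × List String)) : Prop := out = parse_template_alt semesters extra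
instance (semesters : List (List String)) (extra : List String) (out : List (String × List String)) : Decidable (Spec_parse_template semesters extra out) := by unfold Spec_parse_template; infer_instance

-- ===== CLAIM (what is proved, stated in full; the proofs are below) =====
def Claim_equal_parse_template : Prop := ∀ (semesters : List (List String)) (extra : List String), Dom_parse_template semesters extra → Spec_parse_template semesters extra (parse_template semesters extra)

-- ===== LEMMAS AND PROOFS =====

-- the (curr_year, first_sem_in_year) state of A's loop after i iterations
def pvYear (i : Nat) : Int :=
  match i with
  | 0 => 1 | 1 => 1 | 2 => 2 | 3 => 2 | 4 => 3 | 5 => 3 | 6 => 4 | 7 => 4 | _ => 5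

def pvFirst (i : Nat) : Bool :=
  match i with
  | 1 => false | 3 => false | 5 => false | 7 => false | _ => true

-- loop invariant: from the i-th state, A's loop inserts exactly the pairs (pvLabels.drop i).zip rest
theorem pvLoopA_eq (rest : List (List String)) :
    ∀ (i : Nat) (sems : PySem.Dict String (List String)),
      pvLoopA rest sems (pvYear i) (pvFirst i) =
        ((pvLabels.drop i).zip rest).foldl (fun d p => d.insert p.1 p.2) sems := by
  induction rest with
  | nil => intro i sems; cases h : (pvLabels.drop i) <;> simp [pvLoopA]
  | cons x rest ih =>
    intro i sems
    by_cases hi : i < 8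
    · interval_cases i <;>
        simp only [pvYear, pvFirst, pvLoopA, pvLabels] <;>
        · norm_num
          first
          | exact ih 1 _ | exact ih 2 _ | exact ih 3 _ | exact ih 4 _
          | exact ih 5 _ | exact ih 6 _ | exact ih 7 _ | exact ih 8 _
    · obtain ⟨k, rfl⟩ : ∃ k, i = k + 8 := ⟨i - 8, by omega⟩
      have hdrop : List.drop (k + 8) pvLabels = [] :=
        List.drop_eq_nil_of_le (by simp [pvLabels])
      have h1 : pvYear (k + 8) = 5 := rfl
      have h2 : pvFirst (k + 8) = true := rfl
      rw [h1, h2, hdrop]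
      show pvLoopA rest sems 5 true = sems
      have := ih (k + 8) sems
      rwa [h1, h2, hdrop] at this

-- ===== VERDICT (by name: the statement is the Claim_ definition above) =====
theorem parse_template_spec : Claim_equal_parse_template := by
  intro semesters extra _
  unfold Spec_parse_template parse_template parse_template_alt
  rw [show PySem.Dict.ofList (pvLabels.zip semesters) =
        (pvLabels.zip semesters).foldl (fun d p => d.insert p.1 p.2) PySem.Dict.empty from rfl]
  rw [show (1 : Int) = pvYear 0 from rfl, show true = pvFirst 0 from rfl, pvLoopA_eq, List.drop_zero]
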